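-- pv_equiv track=rewrite | github.com/almehj/project-euler | problem0719/p719_study.py | all_combos
-- ===== SOURCE A (Python) =====
-- def all_combos(n):
--     if len(n) == 1:
--         return [[n]]
--
--     answer = []
--     d = n[0]
--     for l in all_combos(n[1:]):
--         cd = d + l[0]
--         answer.append([cd] + l[1:])
--         answer.append([d] + l)
--
--     return answer
-- ===== SOURCE B (Python) =====
-- def all_combos(n):
--     # Iterative bitmask enumeration of the n-1 split points (LSB = first gap).
--     first = n[0]
--     result = []
--     for mask in range(1 << (len(n) - 1)):
--         blocks = []
--         cur = first
--         for i in range(1, len(n)):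
--             if (mask >> (i - 1)) & 1:
--                 blocks.append(cur)
--                 cur = n[i]
--             else:
--                 cur = cur + n[i]
--         blocks.append(cur)
--         result.append(blocks)
--     return result
-- ===== Notes on version B (the rewrite author's own statement) =====
-- stated objective: alternative
-- what changed: Replaced the recursion on the string tail (which pairs each sub-partition with two extensions) by a single iterative loop over bitmasks of the n-1 inter-character gaps, building each partition directly.
import Mathlib
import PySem

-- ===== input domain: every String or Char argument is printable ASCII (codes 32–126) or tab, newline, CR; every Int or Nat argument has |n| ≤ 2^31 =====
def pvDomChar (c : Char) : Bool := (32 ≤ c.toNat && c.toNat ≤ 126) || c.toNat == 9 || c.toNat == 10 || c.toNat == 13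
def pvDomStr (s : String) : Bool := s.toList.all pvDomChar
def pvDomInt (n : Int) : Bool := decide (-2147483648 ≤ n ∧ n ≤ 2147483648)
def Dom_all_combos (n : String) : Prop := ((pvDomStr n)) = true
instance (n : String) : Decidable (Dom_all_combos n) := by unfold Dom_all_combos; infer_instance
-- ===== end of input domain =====

-- B enumerates partitions with one bitmask loop instead of A's recursion on the tail (objective: alternative).

-- ===== PORT A =====
-- literal port of A's recursion over the characters of n
def all_combos_rec : List Char → List (List String)
  | [] => []
  | [c] => [[String.mk [c]]]
  | c :: c2 :: rest =>
    let d := String.mk [c]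
    (all_combos_rec (c2 :: rest)).foldl
      (fun answer l =>
        match l with
        | [] => answer            -- unreachable: recursive results are nonempty (Python would raise on l[0])
        | l0 :: lt => answer ++ [(d ++ l0) :: lt, d :: l0 :: lt]) []

def all_combos (n : String) : List (List String) := all_combos_rec n.toList

-- ===== PORT B =====
-- one inner-loop step of Source B: state = (blocks, cur, i)
def pvStepB (mask : Nat) (st : List String × String × Nat) (ch : Char) : List String × String × Nat :=
  if (mask >>> st.2.2) &&& 1 == 1 then (st.1 ++ [st.2.1], String.mk [ch], st.2.2 + 1)
  else (st.1, st.2.1 ++ String.mk [ch], st.2.2 + 1)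

def all_combos_alt (n : String) : List (List String) :=
  match n.toList with
  | [] => []                      -- excluded by Pre_ (Python raises IndexError on n[0])
  | c :: rest =>
    (List.range (2 ^ rest.length)).map (fun mask =>
      let st := rest.foldl (pvStepB mask) ([], String.mk [c], 0)
      st.1 ++ [st.2.1])

-- ===== PRECONDITION & SPEC =====
-- Both Pythons raise IndexError on the empty string (n[0]); Pre_ excludes exactly that input.
def Pre_all_combos (n : String) : Prop := n ≠ ""
instance (n : String) : Decidable (Pre_all_combos n) := by unfold Pre_all_combos; infer_instance
def pvWitness_all_combos : String := ("ab")

def Spec_all_combos (n : String) (out : List (List String)) : Prop := out = all_combos_alt n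
instance (n : String) (out : List (List String)) : Decidable (Spec_all_combos n out) := by unfold Spec_all_combos; infer_instance

-- ===== CLAIM (what is proved, stated in full; the proofs are below) =====
def Claim_equal_all_combos : Prop := ∀ (n : String), Dom_all_combos n → Pre_all_combos n → Spec_all_combos n (all_combos n)

-- ===== LEMMAS AND PROOFS =====

-- recursive specification of Source B's inner loop (bit-by-bit block builder)
def pvBuild : Nat → String → List Char → List String × String
  | _, cur, [] => ([], cur)
  | mask, cur, ch :: rest =>
    if mask &&& 1 == 1 then
      let r := pvBuild (mask >>> 1) (String.mk [ch]) rest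
      (cur :: r.1, r.2)
    else pvBuild (mask >>> 1) (cur ++ String.mk [ch]) rest

def pvPart (mask : Nat) (cur : String) (rest : List Char) : List String :=
  (pvBuild mask cur rest).1 ++ [(pvBuild mask cur rest).2]

theorem pvPart_ne_nil (mask : Nat) (cur : String) (rest : List Char) :
    pvPart mask cur rest ≠ [] := by
  simp [pvPart]

theorem pvFoldB_eq_build : ∀ (rest : List Char) (mask i : Nat) (blocks : List String) (cur : String),
    rest.foldl (pvStepB mask) (blocks, cur, i) =
      (blocks ++ (pvBuild (mask >>> i) cur rest).1, (pvBuild (mask >>> i) cur rest).2, i + rest.length) := by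
  intro rest
  induction rest with
  | nil => intro mask i blocks cur; simp [pvBuild]
  | cons ch rest ih =>
    intro mask i blocks cur
    have hsh : (mask >>> i) >>> 1 = mask >>> (i + 1) := by
      rw [← Nat.shiftRight_add]
    by_cases hb : (mask >>> i) % 2 = 1
    · simp [pvStepB, Nat.and_one_is_mod, hb, ih, pvBuild, hsh, List.append_assoc]
      omega
    · simp [pvStepB, Nat.and_one_is_mod, hb, ih, pvBuild, hsh]
      omega

theorem pvPart_prefix : ∀ (rest : List Char) (mask : Nat) (x y : String),
    pvPart mask (x ++ y) rest =
      (match pvPart mask y rest with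
       | [] => []
       | h :: t => (x ++ h) :: t) := by
  intro rest
  induction rest with
  | nil => intro mask x y; simp [pvPart, pvBuild]
  | cons ch rest ih =>
    intro mask x y
    by_cases hb : mask % 2 = 1
    · simp [pvPart, pvBuild, Nat.and_one_is_mod, hb]
    · have hassoc : (x ++ y) ++ String.mk [ch] = x ++ (y ++ String.mk [ch]) := by
        apply String.ext; simp
      have e1 : pvPart mask (x ++ y) (ch :: rest)
          = pvPart (mask >>> 1) (x ++ (y ++ String.mk [ch])) rest := by
        simp [pvPart, pvBuild, Nat.and_one_is_mod, hb, hassoc]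
      have e2 : pvPart mask y (ch :: rest)
          = pvPart (mask >>> 1) (y ++ String.mk [ch]) rest := by
        simp [pvPart, pvBuild, Nat.and_one_is_mod, hb]
      rw [e1, e2]
      exact ih (mask >>> 1) x (y ++ String.mk [ch])

-- A's loop (append two entries per element) as a flatMap
theorem pvFoldA_eq_flatMap (d : String) :
    ∀ (xs : List (List String)) (acc : List (List String)),
      (∀ l ∈ xs, l ≠ []) →
      xs.foldl (fun answer l =>
        match l with
        | [] => answer
        | l0 :: lt => answer ++ [(d ++ l0) :: lt, d :: l0 :: lt]) acc
      = acc ++ xs.flatMap (fun l =>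
          match l with
          | [] => []
          | l0 :: lt => [(d ++ l0) :: lt, d :: l0 :: lt]) := by
  intro xs
  induction xs with
  | nil => intro acc _; simp
  | cons l xs ih =>
    intro acc h
    match l, h l (by simp) with
    | l0 :: lt, _ =>
      simp only [List.foldl_cons, List.flatMap_cons]
      rw [ih _ (fun m hm => h m (by simp [hm]))]
      simp

theorem pvRange_two_mul : ∀ (k : Nat),
    List.range (2 * k) = (List.range k).flatMap (fun m => [2 * m, 2 * m + 1]) := by
  intro k
  induction k with
  | zero => simp
  | succ k ih =>
    have h2 : 2 * (k + 1) = (2 * k + 1) + 1 := by ring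
    rw [h2, List.range_succ, List.range_succ, List.range_succ, ih]
    simp

theorem pvMain : ∀ (rest : List Char) (c : Char),
    all_combos_rec (c :: rest)
      = (List.range (2 ^ rest.length)).map (fun m => pvPart m (String.mk [c]) rest) := by
  intro rest
  induction rest with
  | nil => intro c; simp [all_combos_rec, pvPart, pvBuild, List.range_one]
  | cons c2 rest ih =>
    intro c
    have hA : all_combos_rec (c :: c2 :: rest)
        = (all_combos_rec (c2 :: rest)).foldl
            (fun answer l =>
              match l with
              | [] => answer
              | l0 :: lt => answer ++ [(String.mk [c] ++ l0) :: lt, String.mk [c] :: l0 :: lt]) [] := rfl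
    rw [hA, ih]
    have hne : ∀ l ∈ (List.range (2 ^ rest.length)).map (fun m => pvPart m (String.mk [c2]) rest), l ≠ [] := by
      intro l hl
      rcases List.mem_map.mp hl with ⟨m, _, rfl⟩
      exact pvPart_ne_nil m _ rest
    rw [pvFoldA_eq_flatMap (String.mk [c]) _ [] hne]
    rw [List.nil_append, List.flatMap_map]
    -- each sub-partition yields exactly the masks 2m and 2m+1 of the longer string
    have hstep : ∀ m : Nat,
        (match pvPart m (String.mk [c2]) rest with
         | [] => ([] : List (List String))
         | l0 :: lt => [(String.mk [c] ++ l0) :: lt, String.mk [c] :: l0 :: lt])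
        = [pvPart (2 * m) (String.mk [c]) (c2 :: rest), pvPart (2 * m + 1) (String.mk [c]) (c2 :: rest)] := by
      intro m
      have hs0 : (2 * m) >>> 1 = m := by rw [Nat.shiftRight_one]; omega
      have hb1 : (2 * m + 1) % 2 = 1 := by omega
      have hs1 : (2 * m + 1) >>> 1 = m := by rw [Nat.shiftRight_one]; omega
      have hsplit : pvPart (2 * m + 1) (String.mk [c]) (c2 :: rest)
          = String.mk [c] :: pvPart m (String.mk [c2]) rest := by
        simp [pvPart, pvBuild, Nat.and_one_is_mod, hb1, hs1]
      have hmerge : pvPart (2 * m) (String.mk [c]) (c2 :: rest)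
          = pvPart m (String.mk [c] ++ String.mk [c2]) rest := by
        simp [pvPart, pvBuild, Nat.and_one_is_mod, hs0]
      rw [hsplit, hmerge, pvPart_prefix rest m (String.mk [c]) (String.mk [c2])]
      rcases h : pvPart m (String.mk [c2]) rest with _ | ⟨h0, t⟩
      · exact absurd h (pvPart_ne_nil _ _ _)
      · simp
    rw [List.flatMap_congr (fun m _ => hstep m)]
    have hlen : (2 : Nat) ^ (c2 :: rest).length = 2 * 2 ^ rest.length := by
      rw [List.length_cons, pow_succ]; ring
    rw [hlen, pvRange_two_mul, List.map_flatMap]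
    simp

theorem pvAlt_cons (c : Char) (rest : List Char) (n : String) (h : n.toList = c :: rest) :
    all_combos_alt n = (List.range (2 ^ rest.length)).map (fun m => pvPart m (String.mk [c]) rest) := by
  unfold all_combos_alt
  rw [h]
  apply List.map_congr_left
  intro mask _
  have hfold := pvFoldB_eq_build rest mask 0 [] (String.mk [c])
  simp only [Nat.shiftRight_zero] at hfold
  simp [hfold, pvPart]

-- ===== VERDICT (by name: the statement is the Claim_ definition above) =====
theorem all_combos_spec : Claim_equal_all_combos := by
  intro n _ hpre
  unfold Spec_all_combos
  rcases h : n.toList with _ | ⟨c, rest⟩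
  · exact absurd (String.ext (by simpa using h)) hpre
  · rw [all_combos, h, pvMain rest c, pvAlt_cons c rest n h]
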